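-- pv_equiv track=rewrite | github.com/catarinab/AdventOfCode2021 | Day15/day15.py | expandGraph
-- ===== SOURCE A (Python) =====
-- from copy import deepcopy
-- import itertools
--
-- def insertGraphRigth(expandedGraph, currentGraph, xGraphIndex, yGraphIndex, lineSize):
-- 	for y, yIndex in zip(range(0, lineSize), range(yGraphIndex*lineSize, yGraphIndex*lineSize + lineSize)):
-- 		for x, xIndex in zip(range(0, lineSize), range(xGraphIndex*lineSize, xGraphIndex*lineSize + lineSize)):
-- 			expandedGraph[xIndex][yIndex] = currentGraph[x][y]
--
-- def defineExpandedGraph(size):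
-- 	expandedGraph = [[]]*(size *5)
-- 	for i in range(size*5):
-- 		expandedGraph[i] = []
-- 		for _ in range(size*5):expandedGraph[i].append(0);
-- 	return expandedGraph
--
-- def augmentGraph(currentGraph, size):
-- 	for x,y in itertools.product(range(size), range(size)):
-- 		if(currentGraph[x][y] < 9):
-- 			currentGraph[x][y] = currentGraph[x][y] + 1
-- 		else: currentGraph[x][y] = 1
-- 	return currentGraph
--
-- def expandGraph(input):
-- 	expandedGraph = defineExpandedGraph(len(input))
-- 	previousGraph = deepcopy(input)
-- 	currentGraph = deepcopy(input)
-- 	for xIndex in range(5):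
-- 		previousGraph = deepcopy(currentGraph)
-- 		for yIndex in range(5):
-- 			insertGraphRigth(expandedGraph, currentGraph, xIndex, yIndex, len(input))
-- 			currentGraph = augmentGraph(currentGraph, len(input))
-- 		currentGraph = deepcopy(previousGraph)
-- 		currentGraph = augmentGraph(currentGraph, len(input))
-- 	return expandedGraph
-- ===== SOURCE B (Python) =====
-- def expandGraph(input):
-- 	size = len(input)
-- 	def bump(v, n):
-- 		for _ in range(n):
-- 			v = v + 1 if v < 9 else 1
-- 		return v
-- 	return [[bump(input[X % size][Y % size], X // size + Y // size)
-- 			 for Y in range(5 * size)] for X in range(5 * size)]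
-- ===== Notes on version B (the rewrite author's own statement) =====
-- stated objective: simpler
-- what changed: Replaces the deepcopy/augment-whole-grid/insert-tile loop with a single comprehension over output coordinates, computing each cell as the wrap rule applied (X//size + Y//size) times to input[X%size][Y%size].
import Mathlib
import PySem

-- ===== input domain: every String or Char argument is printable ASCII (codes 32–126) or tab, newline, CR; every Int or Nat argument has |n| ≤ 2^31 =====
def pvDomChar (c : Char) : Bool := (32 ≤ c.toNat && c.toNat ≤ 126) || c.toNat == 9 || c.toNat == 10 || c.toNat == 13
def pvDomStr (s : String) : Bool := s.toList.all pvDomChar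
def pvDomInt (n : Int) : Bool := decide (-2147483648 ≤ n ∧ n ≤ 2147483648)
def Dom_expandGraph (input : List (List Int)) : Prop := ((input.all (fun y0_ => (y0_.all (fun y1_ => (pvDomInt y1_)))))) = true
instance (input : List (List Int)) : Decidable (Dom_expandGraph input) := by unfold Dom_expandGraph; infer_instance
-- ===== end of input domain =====

-- B replaces A's deepcopy/augment-whole-grid/insert-tile loops with one pass over output
-- coordinates, applying the wrap rule (X//size + Y//size) times to input[X%size][Y%size].
-- Return-value equivalence only: A mutates no argument (it deepcopies), B mutates nothing.

-- ===== PORT A =====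
-- expandedGraph[x][y] = v  (in-range assignment; out-of-range indices leave the grid
-- unchanged, which Python never reaches inside Pre_)
def setCell (g : List (List Int)) (x y : Nat) (v : Int) : List (List Int) :=
  g.set x ((g.getD x []).set y v)

-- currentGraph[x][y] read; indices are in range inside Pre_
def pyCell (g : List (List Int)) (x y : Nat) : Int := (g.getD x []).getD y 0

-- inner x-loop of insertGraphRigth (fixed y)
def insCol (eg cg : List (List Int)) (xi yi s y : Nat) : List (List Int) :=
  (List.range s).foldl (fun eg x => setCell eg (xi * s + x) (yi * s + y) (pyCell cg x y)) eg

def insertGraphRigth (expandedGraph currentGraph : List (List Int)) (xGraphIndex yGraphIndex lineSize : Nat) : List (List Int) :=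
  (List.range lineSize).foldl (fun eg y => insCol eg currentGraph xGraphIndex yGraphIndex lineSize y) expandedGraph

def defineExpandedGraph (size : Nat) : List (List Int) :=
  (List.range (size * 5)).map (fun _ => (List.range (size * 5)).foldl (fun r _ => r ++ [(0 : Int)]) [])

-- inner y-loop of augmentGraph's product iteration (fixed x)
def augRow (g : List (List Int)) (x s : Nat) : List (List Int) :=
  (List.range s).foldl
    (fun g y => if pyCell g x y < 9 then setCell g x y (pyCell g x y + 1) else setCell g x y 1) g

def augmentGraph (currentGraph : List (List Int)) (size : Nat) : List (List Int) :=
  (List.range size).foldl (fun g x => augRow g x size) currentGraph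

-- one iteration of the inner yIndex-loop of expandGraph: insert a tile, then augment current
def innerStep (s xi : Nat) (st : List (List Int) × List (List Int)) (yi : Nat) : List (List Int) × List (List Int) :=
  (insertGraphRigth st.1 st.2 xi yi s, augmentGraph st.2 s)

-- one iteration of the outer xIndex-loop: run the inner loop, then restore previous + augment
def outerStep (s : Nat) (st : List (List Int) × List (List Int)) (xi : Nat) : List (List Int) × List (List Int) :=
  (((List.range 5).foldl (innerStep s xi) st).1, augmentGraph st.2 s)

def expandGraph (input : List (List Int)) : List (List Int) :=
  ((List.range 5).foldl (outerStep input.length) (defineExpandedGraph input.length, input)).1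

-- ===== PORT B =====
def bump (v : Int) (n : Nat) : Int :=
  (List.range n).foldl (fun v _ => if v < 9 then v + 1 else 1) v

def expandGraph_alt (input : List (List Int)) : List (List Int) :=
  (List.range (5 * input.length)).map (fun X =>
    (List.range (5 * input.length)).map (fun Y =>
      bump ((input.getD (X % input.length) []).getD (Y % input.length) 0)
        (X / input.length + Y / input.length)))

-- ===== PRECONDITION & SPEC =====
-- Pre_ excludes ragged inputs with a row shorter than the number of rows, on which
-- Python A raises IndexError (it reads a len(input) × len(input) square).
def Pre_expandGraph (input : List (List Int)) : Prop :=
  ∀ row ∈ input, input.length ≤ row.length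
instance (input : List (List Int)) : Decidable (Pre_expandGraph input) := by unfold Pre_expandGraph; infer_instance
def pvWitness_expandGraph : List (List Int) := [[1, 9], [3, 4]]

def Spec_expandGraph (input : List (List Int)) (out : List (List Int)) : Prop := out = expandGraph_alt input
instance (input : List (List Int)) (out : List (List Int)) : Decidable (Spec_expandGraph input out) := by unfold Spec_expandGraph; infer_instance

-- ===== CLAIM (what is proved, stated in full; the proofs are below) =====
def Claim_equal_expandGraph : Prop := ∀ (input : List (List Int)), Dom_expandGraph input → Pre_expandGraph input → Spec_expandGraph input (expandGraph input)

-- ===== LEMMAS AND PROOFS =====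

def step9 (v : Int) : Int := if v < 9 then v + 1 else 1

-- k-fold augmentation (proof-side description of A's repeated augmentGraph)
def augN (g : List (List Int)) (s : Nat) : Nat → List (List Int)
  | 0 => g
  | k + 1 => augmentGraph (augN g s k) s

-- shape of the expanded grid
def ShpE (s : Nat) (g : List (List Int)) : Prop :=
  g.length = s * 5 ∧ ∀ x < s * 5, (g.getD x []).length = s * 5

-- shape of a current grid: s rows, each at least s wide
def ShpC (s : Nat) (g : List (List Int)) : Prop :=
  g.length = s ∧ ∀ x < s, s ≤ (g.getD x []).length

theorem len_setCell (g : List (List Int)) (x y : Nat) (v : Int) :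
    (setCell g x y v).length = g.length := by simp [setCell]

theorem rowlen_setCell (g : List (List Int)) (x y x' : Nat) (v : Int) :
    ((setCell g x y v).getD x' []).length = (g.getD x' []).length := by
  simp [setCell, List.getD, List.getElem?_set]
  split_ifs with h1 h2 <;> simp_all

theorem cell_setCell (g : List (List Int)) (x y x' y' : Nat) (v : Int) :
    pyCell (setCell g x y v) x' y' =
      if x = x' ∧ y = y' ∧ x < g.length ∧ y < (g.getD x []).length then v
      else pyCell g x' y' := by
  unfold pyCell setCell
  simp only [List.getD, List.getElem?_set]
  by_cases hxx : x = x'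
  · subst hxx
    by_cases hx : x < g.length
    · simp only [hx, if_true, List.getElem?_eq_getElem hx, Option.getD_some,
        List.getElem?_set]
      by_cases hyy : y = y'
      · subst hyy
        by_cases hy : y < g[x].length
        · simp [hy]
        · rw [if_pos rfl, if_neg hy, if_neg (by simp_all),
            List.getElem?_eq_none (by omega)]
      · simp [hyy]
    · rw [if_pos rfl, if_neg hx, if_neg (by tauto),
        List.getElem?_eq_none (by omega : g.length ≤ x)]
  · simp [hxx]


-- both grids have the same row count and the same row lengths
def samedim (g h : List (List Int)) : Prop :=
  g.length = h.length ∧ ∀ x, (g.getD x []).length = (h.getD x []).length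

theorem samedim_refl (g : List (List Int)) : samedim g g := ⟨rfl, fun _ => rfl⟩

theorem samedim_trans {g h k : List (List Int)} (h1 : samedim g h) (h2 : samedim h k) :
    samedim g k := ⟨h1.1.trans h2.1, fun x => (h1.2 x).trans (h2.2 x)⟩

theorem samedim_setCell (g : List (List Int)) (x y : Nat) (v : Int) :
    samedim (setCell g x y v) g :=
  ⟨len_setCell g x y v, fun x' => rowlen_setCell g x y x' v⟩

theorem samedim_foldl {α : Type} (l : List α) (f : List (List Int) → α → List (List Int))
    (hf : ∀ g a, samedim (f g a) g) (g : List (List Int)) : samedim (l.foldl f g) g := by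
  induction l generalizing g with
  | nil => exact samedim_refl g
  | cons a l ih => exact samedim_trans (ih (f g a)) (hf g a)

-- the augment loop body is setCell with the wrap step
theorem augBody_eq (g : List (List Int)) (x y : Nat) :
    (if pyCell g x y < 9 then setCell g x y (pyCell g x y + 1) else setCell g x y 1) =
      setCell g x y (step9 (pyCell g x y)) := by
  unfold step9; split <;> rfl

theorem samedim_augRow (g : List (List Int)) (x s : Nat) : samedim (augRow g x s) g := by
  refine samedim_foldl _ _ (fun g y => ?_) g
  rw [augBody_eq]; exact samedim_setCell g x y _

theorem cell_augRow (g : List (List Int)) (x s x' y' : Nat) :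
    pyCell (augRow g x s) x' y' =
      if x = x' ∧ y' < s ∧ x < g.length ∧ y' < (g.getD x []).length then
        step9 (pyCell g x' y')
      else pyCell g x' y' := by
  induction s generalizing x' y' with
  | zero => simp [augRow]
  | succ s ih =>
    rw [augRow, List.range_succ, List.foldl_append, List.foldl_cons, List.foldl_nil,
      augBody_eq, cell_setCell]
    rw [show (List.range s).foldl
        (fun g y => if pyCell g x y < 9 then setCell g x y (pyCell g x y + 1) else setCell g x y 1) g
        = augRow g x s from rfl] at *
    have hd := samedim_augRow g x s
    rw [hd.1, hd.2 x, ih x' y']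
    rw [show pyCell (augRow g x s) x s = pyCell g x s from by rw [ih x s]; simp]
    simp only [List.getD] at *
    by_cases hxl : x < g.length
    · simp only [List.getElem?_eq_getElem hxl, Option.getD_some] at *
      clear ih hd
      split_ifs <;> first | rfl | omega | (simp_all; omega) | simp_all
    · simp only [List.getElem?_eq_none (le_of_not_gt hxl), Option.getD_none, List.length_nil] at *
      split_ifs <;> first | rfl | omega

theorem bump_succ (v : Int) (n : Nat) : bump v (n + 1) = step9 (bump v n) := by
  simp [bump, List.range_succ, step9]

theorem samedim_aug (g : List (List Int)) (s : Nat) : samedim (augmentGraph g s) g :=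
  samedim_foldl _ _ (fun g x => samedim_augRow g x s) g

theorem shpC_of_samedim {s : Nat} {g h : List (List Int)} (hd : samedim g h) (hc : ShpC s h) :
    ShpC s g :=
  ⟨hd.1.trans hc.1, fun x hx => (hd.2 x) ▸ hc.2 x hx⟩

theorem shpE_of_samedim {s : Nat} {g h : List (List Int)} (hd : samedim g h) (hc : ShpE s h) :
    ShpE s g :=
  ⟨hd.1.trans hc.1, fun x hx => (hd.2 x) ▸ hc.2 x hx⟩

theorem shpC_aug {s : Nat} {g : List (List Int)} (h : ShpC s g) : ShpC s (augmentGraph g s) :=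
  shpC_of_samedim (samedim_aug g s) h

theorem cell_augAux (s : Nat) (k : Nat) (g : List (List Int)) (x' y' : Nat) :
    pyCell ((List.range k).foldl (fun g x => augRow g x s) g) x' y' =
      if x' < k ∧ y' < s ∧ x' < g.length ∧ y' < (g.getD x' []).length then step9 (pyCell g x' y')
      else pyCell g x' y' := by
  induction k generalizing x' y' with
  | zero => simp
  | succ k ih =>
    rw [List.range_succ, List.foldl_append, List.foldl_cons, List.foldl_nil, cell_augRow]
    have hd : samedim ((List.range k).foldl (fun g x => augRow g x s) g) g :=
      samedim_foldl _ _ (fun g x => samedim_augRow g x s) g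
    rw [hd.1, hd.2 k, ih x' y']
    clear ih hd
    by_cases hk : k = x'
    · subst hk
      simp only [List.getD] at *
      by_cases hxl : k < g.length
      · simp only [List.getElem?_eq_getElem hxl, Option.getD_some, true_and] at *
        split_ifs <;> first | rfl | omega | tauto
      · simp only [List.getElem?_eq_none (le_of_not_gt hxl), Option.getD_none,
          List.length_nil, true_and] at *
        split_ifs <;> first | rfl | omega | tauto
    · rw [if_neg (by tauto)]
      split_ifs <;> first | rfl | omega

theorem cell_aug {s : Nat} (g : List (List Int)) (h : ShpC s g) {x y : Nat}
    (hx : x < s) (hy : y < s) :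
    pyCell (augmentGraph g s) x y = step9 (pyCell g x y) := by
  rw [show augmentGraph g s = (List.range s).foldl (fun g x => augRow g x s) g from rfl,
    cell_augAux s s g x y, if_pos ⟨hx, hy, by rw [h.1]; exact hx, by have := h.2 x hx; omega⟩]

theorem shpC_augN {s : Nat} {g : List (List Int)} (h : ShpC s g) (k : Nat) : ShpC s (augN g s k) := by
  induction k with
  | zero => exact h
  | succ k ih => exact shpC_aug ih

theorem cell_augN {s : Nat} (g : List (List Int)) (h : ShpC s g) {x y : Nat}
    (hx : x < s) (hy : y < s) (k : Nat) :
    pyCell (augN g s k) x y = bump (pyCell g x y) k := by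
  induction k with
  | zero => simp [augN, bump]
  | succ k ih => rw [augN, cell_aug _ (shpC_augN h k) hx hy, ih, bump_succ]

theorem augN_add (g : List (List Int)) (s a b : Nat) :
    augN (augN g s a) s b = augN g s (a + b) := by
  induction b with
  | zero => rfl
  | succ b ih => simp [augN, ih]

theorem samedim_insCol (eg cg : List (List Int)) (xi yi s y : Nat) :
    samedim (insCol eg cg xi yi s y) eg :=
  samedim_foldl _ _ (fun eg _ => samedim_setCell eg _ _ _) eg

theorem shpE_insert {s : Nat} {eg : List (List Int)} (cg : List (List Int)) (xi yi : Nat)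
    (h : ShpE s eg) : ShpE s (insertGraphRigth eg cg xi yi s) :=
  shpE_of_samedim
    (samedim_foldl _ _ (fun eg y => samedim_insCol eg cg xi yi s y) eg) h

theorem cell_insColAux (cg : List (List Int)) (xi yi s y : Nat) (k : Nat)
    (eg : List (List Int)) (X Y : Nat) :
    pyCell ((List.range k).foldl
        (fun eg x => setCell eg (xi * s + x) (yi * s + y) (pyCell cg x y)) eg) X Y =
      if xi * s ≤ X ∧ X < xi * s + k ∧ Y = yi * s + y ∧ X < eg.length ∧
          Y < (eg.getD X []).length then
        pyCell cg (X - xi * s) y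
      else pyCell eg X Y := by
  induction k generalizing X Y with
  | zero => simp; intros; omega
  | succ k ih =>
    rw [List.range_succ, List.foldl_append, List.foldl_cons, List.foldl_nil, cell_setCell]
    have hd : samedim ((List.range k).foldl
        (fun eg x => setCell eg (xi * s + x) (yi * s + y) (pyCell cg x y)) eg) eg :=
      samedim_foldl _ _ (fun eg x => samedim_setCell eg _ _ _) eg
    rw [hd.1, hd.2 (xi * s + k), ih X Y]
    by_cases hX : xi * s + k = X
    · subst hX
      simp only [Nat.add_sub_cancel_left, true_and]
      by_cases hY : yi * s + y = Y
      · subst hY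
        split_ifs <;> first | rfl | omega
      · rw [if_neg (by tauto), if_neg (by omega), if_neg (by tauto)]
    · rw [if_neg (by tauto)]
      split_ifs <;> first | rfl | omega

theorem cell_insCol (eg cg : List (List Int)) (xi yi s y : Nat) (X Y : Nat) :
    pyCell (insCol eg cg xi yi s y) X Y =
      if xi * s ≤ X ∧ X < xi * s + s ∧ Y = yi * s + y ∧ X < eg.length ∧
          Y < (eg.getD X []).length then
        pyCell cg (X - xi * s) y
      else pyCell eg X Y :=
  cell_insColAux cg xi yi s y s eg X Y

theorem cell_insertAux (cg : List (List Int)) (xi yi s : Nat) (k : Nat)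
    (eg : List (List Int)) (X Y : Nat) :
    pyCell ((List.range k).foldl (fun eg y => insCol eg cg xi yi s y) eg) X Y =
      if xi * s ≤ X ∧ X < xi * s + s ∧ yi * s ≤ Y ∧ Y < yi * s + k ∧ X < eg.length ∧
          Y < (eg.getD X []).length then
        pyCell cg (X - xi * s) (Y - yi * s)
      else pyCell eg X Y := by
  induction k generalizing X Y with
  | zero => simp; intros; omega
  | succ k ih =>
    rw [List.range_succ, List.foldl_append, List.foldl_cons, List.foldl_nil, cell_insCol]
    have hd : samedim ((List.range k).foldl (fun eg y => insCol eg cg xi yi s y) eg) eg :=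
      samedim_foldl _ _ (fun eg y => samedim_insCol eg cg xi yi s y) eg
    rw [hd.1, hd.2 X, ih X Y]
    by_cases hY : Y = yi * s + k
    · subst hY
      simp only [Nat.add_sub_cancel_left, true_and]
      split_ifs <;> first | rfl | omega
    · rw [if_neg (by tauto)]
      split_ifs <;> first | rfl | omega

theorem cell_insert' {s : Nat} (eg cg : List (List Int)) {xi yi : Nat}
    (h : ShpE s eg) (hxi : xi < 5) (hyi : yi < 5) (X Y : Nat) :
    pyCell (insertGraphRigth eg cg xi yi s) X Y =
      if xi * s ≤ X ∧ X < xi * s + s ∧ yi * s ≤ Y ∧ Y < yi * s + s then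
        pyCell cg (X - xi * s) (Y - yi * s)
      else pyCell eg X Y := by
  rw [show insertGraphRigth eg cg xi yi s =
      (List.range s).foldl (fun eg y => insCol eg cg xi yi s y) eg from rfl,
    cell_insertAux cg xi yi s s eg X Y]
  have hxb : xi * s + s ≤ s * 5 := by
    have h1 := Nat.mul_le_mul_right s (show xi + 1 ≤ 5 by omega)
    rw [Nat.add_mul, one_mul] at h1
    omega
  have hyb : yi * s + s ≤ s * 5 := by
    have h1 := Nat.mul_le_mul_right s (show yi + 1 ≤ 5 by omega)
    rw [Nat.add_mul, one_mul] at h1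
    omega
  by_cases hc : xi * s ≤ X ∧ X < xi * s + s ∧ yi * s ≤ Y ∧ Y < yi * s + s
  · have hX5 : X < s * 5 := by omega
    have hrl := h.2 X hX5
    have hlen := h.1
    rw [if_pos ⟨hc.1, hc.2.1, hc.2.2.1, hc.2.2.2, by omega, by omega⟩, if_pos hc]
  · rw [if_neg (by tauto), if_neg hc]

theorem inner_spec {s : Nat} (hs : 0 < s) (eg cur : List (List Int)) {xi : Nat}
    (hE : ShpE s eg) (_hC : ShpC s cur) (hxi : xi < 5) (k : Nat) (hk : k ≤ 5) :
    ((List.range k).foldl (innerStep s xi) (eg, cur)).2 = augN cur s k ∧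
    ShpE s ((List.range k).foldl (innerStep s xi) (eg, cur)).1 ∧
    ∀ X Y, pyCell ((List.range k).foldl (innerStep s xi) (eg, cur)).1 X Y =
      if xi * s ≤ X ∧ X < xi * s + s ∧ Y < k * s then
        pyCell (augN cur s (Y / s)) (X - xi * s) (Y % s)
      else pyCell eg X Y := by
  induction k with
  | zero => exact ⟨rfl, hE, fun X Y => by simp⟩
  | succ k ih =>
    obtain ⟨h2, hE', hcell⟩ := ih (by omega)
    rw [List.range_succ, List.foldl_append, List.foldl_cons, List.foldl_nil]
    refine ⟨by simp [innerStep, h2, augN], by simpa [innerStep] using shpE_insert _ xi k hE', ?_⟩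
    intro X Y
    show pyCell (insertGraphRigth _ _ xi k s) X Y = _
    rw [h2, cell_insert' _ (augN cur s k) hE' hxi (by omega) X Y]
    by_cases hband : xi * s ≤ X ∧ X < xi * s + s ∧ k * s ≤ Y ∧ Y < k * s + s
    · rw [if_pos hband]
      have hdiv : Y / s = k :=
        Nat.div_eq_of_lt_le hband.2.2.1 (by rw [Nat.add_mul, one_mul]; omega)
      have hmod : Y % s = Y - k * s := by
        have h0 := Nat.mod_add_div Y s
        rw [hdiv, Nat.mul_comm] at h0
        omega
      rw [if_pos ⟨hband.1, hband.2.1, by rw [Nat.add_mul, one_mul]; omega⟩, hdiv, hmod]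
    · rw [if_neg hband, hcell X Y]
      by_cases hold : xi * s ≤ X ∧ X < xi * s + s ∧ Y < k * s
      · rw [if_pos hold,
          if_pos ⟨hold.1, hold.2.1, by rw [Nat.add_mul, one_mul]; omega⟩]
      · rw [if_neg hold, if_neg (by rw [Nat.add_mul, one_mul]; omega)]

theorem outer_spec {s : Nat} (hs : 0 < s) (eg input : List (List Int))
    (hE : ShpE s eg) (hC : ShpC s input) (k : Nat) (hk : k ≤ 5) :
    ((List.range k).foldl (outerStep s) (eg, input)).2 = augN input s k ∧
    ShpE s ((List.range k).foldl (outerStep s) (eg, input)).1 ∧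
    ∀ X Y, pyCell ((List.range k).foldl (outerStep s) (eg, input)).1 X Y =
      if X < k * s ∧ Y < 5 * s then
        pyCell (augN input s (X / s + Y / s)) (X % s) (Y % s)
      else pyCell eg X Y := by
  induction k with
  | zero => exact ⟨rfl, hE, fun X Y => by simp⟩
  | succ k ih =>
    obtain ⟨h2, hE', hcell⟩ := ih (by omega)
    have hpair : (List.range k).foldl (outerStep s) (eg, input)
        = (((List.range k).foldl (outerStep s) (eg, input)).1, augN input s k) := by
      rw [← h2]
    obtain ⟨i2, iE, icell⟩ :=
      inner_spec hs ((List.range k).foldl (outerStep s) (eg, input)).1 (augN input s k)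
        hE' (shpC_augN hC k) (show k < 5 by omega) 5 (le_refl 5)
    rw [List.range_succ, List.foldl_append, List.foldl_cons, List.foldl_nil, hpair]
    refine ⟨by simp [outerStep, augN], by simpa [outerStep] using iE, ?_⟩
    intro X Y
    show pyCell ((List.range 5).foldl (innerStep s k)
        (((List.range k).foldl (outerStep s) (eg, input)).1, augN input s k)).1 X Y = _
    rw [icell X Y]
    by_cases hband : k * s ≤ X ∧ X < k * s + s ∧ Y < 5 * s
    · rw [if_pos ⟨hband.1, hband.2.1, hband.2.2⟩]
      have hdiv : X / s = k :=
        Nat.div_eq_of_lt_le hband.1 (by rw [Nat.add_mul, one_mul]; omega)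
      have hmod : X % s = X - k * s := by
        have h0 := Nat.mod_add_div X s
        rw [hdiv, Nat.mul_comm] at h0
        omega
      rw [if_pos ⟨by rw [Nat.add_mul, one_mul]; omega, hband.2.2⟩, augN_add, hdiv, hmod]
    · rw [if_neg (by tauto), hcell X Y]
      by_cases hold : X < k * s ∧ Y < 5 * s
      · rw [if_pos hold, if_pos ⟨by rw [Nat.add_mul, one_mul]; omega, hold.2⟩]
      · rw [if_neg hold, if_neg (by rw [Nat.add_mul, one_mul]; omega)]

theorem zrow_len (l : List Nat) (r : List Int) :
    (l.foldl (fun r _ => r ++ [(0 : Int)]) r).length = r.length + l.length := by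
  induction l generalizing r with
  | nil => simp
  | cons a l ih => simp

theorem shpE_define (s : Nat) : ShpE s (defineExpandedGraph s) := by
  unfold defineExpandedGraph ShpE
  refine ⟨by simp, fun x hx => ?_⟩
  rw [List.getD_eq_getElem _ _ (by simpa using hx)]
  simp only [List.getElem_map]
  rw [zrow_len]
  simp

-- ===== VERDICT (by name: the statement is the Claim_ definition above) =====
theorem expandGraph_spec : Claim_equal_expandGraph := by
  intro input _ hpre
  unfold Spec_expandGraph
  by_cases hs0 : input.length = 0
  · rw [List.length_eq_zero_iff] at hs0
    subst hs0
    rfl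
  · have hs : 0 < input.length := Nat.pos_of_ne_zero hs0
    have hC : ShpC input.length input := by
      refine ⟨rfl, fun x hx => ?_⟩
      rw [List.getD_eq_getElem _ _ hx]
      exact hpre _ (List.getElem_mem hx)
    obtain ⟨-, hE5, hcell⟩ :=
      outer_spec hs (defineExpandedGraph input.length) input (shpE_define input.length) hC 5
        (le_refl 5)
    have hAeq : expandGraph input =
        ((List.range 5).foldl (outerStep input.length)
          (defineExpandedGraph input.length, input)).1 := rfl
    have hlenA : (expandGraph input).length = input.length * 5 := by rw [hAeq]; exact hE5.1
    have hlenB : (expandGraph_alt input).length = 5 * input.length := by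
      simp [expandGraph_alt]
    apply List.ext_getElem (by rw [hlenA, hlenB, Nat.mul_comm])
    intro X hX hX'
    have hX5 : X < input.length * 5 := by omega
    have hrowA : (expandGraph input)[X].length = input.length * 5 := by
      rw [← List.getD_eq_getElem _ [] hX, hAeq]
      exact hE5.2 X hX5
    apply List.ext_getElem
    · rw [hrowA]
      simp [expandGraph_alt, Nat.mul_comm]
    intro Y hY hY'
    have hY5 : Y < input.length * 5 := by rw [hrowA] at hY; exact hY
    have hA : (expandGraph input)[X][Y] = pyCell (expandGraph input) X Y := by
      unfold pyCell
      rw [List.getD_eq_getElem _ _ hX, List.getD_eq_getElem _ _ hY]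
    rw [hA, hAeq, hcell X Y, if_pos ⟨by omega, by omega⟩,
      cell_augN input hC (Nat.mod_lt X hs) (Nat.mod_lt Y hs)
        (X / input.length + Y / input.length)]
    simp [expandGraph_alt, pyCell, bump]
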